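-- pv_equiv track=rewrite | github.com/SmartestKen/public | trash/SS/Matching Poset/test.py | subPartition
-- ===== SOURCE A (Python) =====
-- def subPartition(shape, curRow):
--
--     # base case, last row -> select or not select
--     if curRow == len(shape)-1:
--         mu1 = list(shape)
--         mu2 = list(shape)
--         mu2[-1] -= 1
--         if mu2[-1] == 0:
--             del mu2[-1]
--             return [mu1, mu2]
--         else:
--             return [mu1] + subPartition(mu2, curRow)
--
--     # not last row, if curRow not selectable
--     if shape[curRow] == shape[curRow+1]:
--         return subPartition(shape, curRow+1)
--     # else, can choose to
--     # not select and jump to next line, or select and stay at current line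
--     else:
--         mu2 = list(shape)
--         mu2[curRow] -= 1
--         # [mu1] +
--         return subPartition(shape, curRow+1) + subPartition(mu2, curRow)
-- ===== SOURCE B (Python) =====
-- def subPartition(shape, curRow):
--     # Iterative Cartesian product: row i of the tail ranges rows[i]..rows[i+1]
--     # (descending), the last row ranges rows[-1]..0 (0 = row removed).
--     # The product construction is only meaningful on a genuine partition tail,
--     # so validate the input first.
--     if not 0 <= curRow < len(shape):
--         raise IndexError("curRow out of range")
--     rows = shape[curRow:]
--     if any(a < b for a, b in zip(rows, rows[1:])) or rows[-1] < 1: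
--         raise ValueError("shape[curRow:] is not a weakly decreasing positive partition")
--     ranges = [list(range(rows[i], rows[i + 1] - 1, -1)) for i in range(len(rows) - 1)]
--     ranges.append(list(range(rows[-1], -1, -1)))
--     combos = [[]]
--     for rng in ranges:
--         combos = [c + [v] for c in combos for v in rng]
--     prefix = shape[:curRow]
--     out = []
--     for c in combos:
--         row = prefix + c
--         if row[-1] == 0:
--             row = row[:-1]
--         out.append(row)
--     return out
-- ===== Notes on version B (the rewrite author's own statement) =====
-- stated objective: alternative
-- what changed: Replaces A's branching recursion (decrement a row or move to the next row) by a single iterative Cartesian product: after validating the input, each tail row gets its descending range (rows[i]..rows[i+1], the last row down to 0 with 0 meaning 'drop the row'), the combinations are built with one fold and the fixed prefix shape[:curRow] is prepended.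
-- outside the precondition, e.g. on subPartition([2, 2], -2): A returns [[2, 2], [2, 1], [2]], B raises IndexError
import Mathlib
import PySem

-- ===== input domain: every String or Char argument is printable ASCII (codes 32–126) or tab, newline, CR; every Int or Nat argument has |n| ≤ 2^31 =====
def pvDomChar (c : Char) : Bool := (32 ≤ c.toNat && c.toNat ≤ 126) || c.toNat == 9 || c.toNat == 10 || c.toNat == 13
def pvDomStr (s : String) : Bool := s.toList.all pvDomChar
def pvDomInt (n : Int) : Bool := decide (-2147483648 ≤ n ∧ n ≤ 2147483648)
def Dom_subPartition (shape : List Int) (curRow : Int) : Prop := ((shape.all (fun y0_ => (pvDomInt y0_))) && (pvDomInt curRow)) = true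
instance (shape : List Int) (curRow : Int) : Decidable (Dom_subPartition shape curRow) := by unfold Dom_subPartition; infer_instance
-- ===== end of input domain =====

-- B replaces A's branching recursion by one iterative Cartesian product of per-row
-- descending ranges (objective: alternative decomposition, same asymptotic cost).

-- ===== PORT A =====
-- A's recursion terminates only on genuine partitions (Pre_ below); the port carries a
-- fuel argument that provably suffices inside Pre_ (fuel 0 / IndexError branches are
-- unreachable inside Pre_).
def subPartitionFuel : Nat → List Int → Int → List (List Int)
  | 0, _, _ => []                                        -- fuel exhausted: Python does not return (outside Pre_)
  | fuel+1, shape, curRow =>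
    if curRow = (shape.length : Int) - 1 then
      -- mu1 = list(shape); mu2 = list(shape); mu2[-1] -= 1  (negative-index update, exact for nonempty shape)
      match PySem.List.pyGet? shape (-1) with
      | none => []                                       -- IndexError on empty shape (outside Pre_)
      | some x =>
        let mu1 := shape
        let mu2 := shape.dropLast ++ [x - 1]
        if x - 1 = 0 then [mu1, mu2.dropLast]            -- del mu2[-1]; return [mu1, mu2]
        else [mu1] ++ subPartitionFuel fuel mu2 curRow
    else
      match PySem.List.pyGet? shape curRow, PySem.List.pyGet? shape (curRow + 1) with
      | some a, some b =>
        if a = b then subPartitionFuel fuel shape (curRow + 1)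
        else
          let mu2 := shape.set curRow.toNat (a - 1)      -- mu2[curRow] -= 1 (curRow ≥ 0 inside Pre_)
          subPartitionFuel fuel shape (curRow + 1) ++ subPartitionFuel fuel mu2 curRow
      | _, _ => []                                       -- IndexError (outside Pre_)

def subPartition (shape : List Int) (curRow : Int) : List (List Int) :=
  subPartitionFuel ((shape.map Int.toNat).sum + shape.length + 1) shape curRow

-- ===== PORT B =====
def subPartition_alt (shape : List Int) (curRow : Int) : List (List Int) :=
  if ¬ (0 ≤ curRow ∧ curRow < (shape.length : Int)) then []  -- raise IndexError (outside Pre_)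
  else
    -- rows = shape[curRow:]
    let rows := PySem.List.slice shape (some curRow) none
    -- if any(a < b for a, b in zip(rows, rows[1:])) or rows[-1] < 1: raise ValueError
    if (rows.zip (PySem.List.slice rows (some 1) none)).any (fun p => decide (p.1 < p.2))
        || decide (PySem.List.pyGetD rows (-1) 0 < 1) then []  -- raise ValueError (outside Pre_)
    else
      -- ranges = [list(range(rows[i], rows[i+1]-1, -1)) for i in range(len(rows)-1)]
      let ranges := (PySem.List.pyRange 0 ((rows.length : Int) - 1) 1).map (fun i =>
          PySem.List.pyRange (PySem.List.pyGetD rows i 0) (PySem.List.pyGetD rows (i + 1) 0 - 1) (-1))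
      -- ranges.append(list(range(rows[-1], -1, -1)))
      let ranges := ranges ++ [PySem.List.pyRange (PySem.List.pyGetD rows (-1) 0) (-1) (-1)]
      -- combos = [[]]; for rng in ranges: combos = [c + [v] for c in combos for v in rng]
      let combos := ranges.foldl (fun cs rng => cs.flatMap (fun c => rng.map (fun v => c ++ [v]))) [[]]
      -- prefix = shape[:curRow] (named pre: Lean keyword); rows built as prefix + c, trimmed of a trailing 0
      let pre := PySem.List.slice shape none (some curRow)
      combos.map (fun c =>
        let row := pre ++ c
        if PySem.List.pyGetD row (-1) 0 = 0 then PySem.List.slice row none (some (-1)) else row)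

-- ===== PRECONDITION & SPEC =====
-- Pre_ excludes inputs with curRow outside [0, len(shape)) or with a tail shape[curRow:]
-- that is not a weakly decreasing positive sequence: there A raises IndexError or recurses
-- forever (RecursionError), except for some negative curRow where Python's negative-index
-- wraparound lets A return an accidental value — B raises IndexError on those.
def pvDescPos : List Int → Bool
  | [] => true
  | [x] => decide (1 ≤ x)
  | x :: y :: t => decide (y ≤ x) && pvDescPos (y :: t)

def Pre_subPartition (shape : List Int) (curRow : Int) : Prop :=
  0 ≤ curRow ∧ curRow < (shape.length : Int) ∧ pvDescPos (shape.drop curRow.toNat) = true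
instance (shape : List Int) (curRow : Int) : Decidable (Pre_subPartition shape curRow) := by
  unfold Pre_subPartition; infer_instance

def pvWitness_subPartition : List Int × Int := ([3, 2, 2], 0)

def Spec_subPartition (shape : List Int) (curRow : Int) (out : List (List Int)) : Prop := out = subPartition_alt shape curRow
instance (shape : List Int) (curRow : Int) (out : List (List Int)) : Decidable (Spec_subPartition shape curRow out) := by unfold Spec_subPartition; infer_instance

-- ===== CLAIM (what is proved, stated in full; the proofs are below) =====
def Claim_equal_subPartition : Prop := ∀ (shape : List Int) (curRow : Int), Dom_subPartition shape curRow → Pre_subPartition shape curRow → Spec_subPartition shape curRow (subPartition shape curRow)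

-- ===== LEMMAS AND PROOFS =====

-- reference form: the result for the tail shape.drop curRow (rows before curRow are a fixed prefix)
def pvR : List Int → List (List Int)
  | [] => [[]]
  | [x] => (PySem.List.pyRange x (-1) (-1)).map (fun v => if v = 0 then [] else [v])
  | x :: y :: t => (PySem.List.pyRange x (y - 1) (-1)).flatMap (fun v => (pvR (y :: t)).map (fun d => v :: d))

def pvStep (cs : List (List Int)) (rng : List Int) : List (List Int) :=
  cs.flatMap (fun c => rng.map (fun v => c ++ [v]))

def pvProd (rs : List (List Int)) : List (List Int) := rs.foldl pvStep [[]]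

def pvRangesOf : List Int → List (List Int)
  | [] => []
  | [x] => [PySem.List.pyRange x (-1) (-1)]
  | x :: y :: t => PySem.List.pyRange x (y - 1) (-1) :: pvRangesOf (y :: t)

theorem pvProd_foldl (rs : List (List Int)) : ∀ cs,
    rs.foldl pvStep cs = cs.flatMap (fun c => (pvProd rs).map (fun d => c ++ d)) := by
  induction rs with
  | nil => intro cs; simp [pvProd]
  | cons r rs ih =>
    intro cs
    show List.foldl pvStep (pvStep cs r) rs = _
    rw [ih]
    have h2 : pvProd (r :: rs) = List.foldl pvStep (pvStep [[]] r) rs := rfl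
    rw [h2, ih]
    simp [pvStep, List.flatMap_assoc, Function.comp_def, List.map_flatMap, List.flatMap_map,
      List.map_map, List.append_assoc]

theorem pvProd_cons (r : List Int) (rs : List (List Int)) :
    pvProd (r :: rs) = r.flatMap (fun v => (pvProd rs).map (fun d => v :: d)) := by
  have h2 : pvProd (r :: rs) = List.foldl pvStep (pvStep [[]] r) rs := rfl
  rw [h2, pvProd_foldl]
  simp [pvStep, List.flatMap_map]

theorem pvRangesOf_spec (shape : List Int) (curRow : Int)
    (h0 : 0 ≤ curRow) (h1 : curRow < (shape.length : Int)) :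
    (PySem.List.pyRange curRow ((shape.length : Int) - 1) 1).map (fun r =>
        PySem.List.pyRange (PySem.List.pyGetD shape r 0) (PySem.List.pyGetD shape (r + 1) 0 - 1) (-1))
      ++ [PySem.List.pyRange (PySem.List.pyGetD shape (-1) 0) (-1) (-1)]
    = pvRangesOf (shape.drop curRow.toNat) := by
  have hRone : ∀ x : Int, pvRangesOf [x] = [PySem.List.pyRange x (-1) (-1)] := fun _ => rfl
  have hRtwo : ∀ (a b : Int) (t : List Int),
      pvRangesOf (a :: b :: t) = PySem.List.pyRange a (b - 1) (-1) :: pvRangesOf (b :: t) :=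
    fun _ _ _ => rfl
  have hne : shape ≠ [] := by
    intro h; rw [h] at h1; simp at h1; omega
  have main : ∀ (k : Nat) (curRow : Int), 0 ≤ curRow → curRow.toNat < shape.length →
      shape.length - 1 - curRow.toNat = k →
      (PySem.List.pyRange curRow ((shape.length : Int) - 1) 1).map (fun r =>
          PySem.List.pyRange (PySem.List.pyGetD shape r 0) (PySem.List.pyGetD shape (r + 1) 0 - 1) (-1))
        ++ [PySem.List.pyRange (PySem.List.pyGetD shape (-1) 0) (-1) (-1)]
      = pvRangesOf (shape.drop curRow.toNat) := by
    intro k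
    induction k with
    | zero =>
      intro curRow h0 h1 hk
      have hct : curRow.toNat = shape.length - 1 := by omega
      rw [PySem.List.pyRange_one_eq_nil (by omega)]
      have hlen1 : shape.length - 1 + 1 = shape.length := by omega
      have hdrop : shape.drop curRow.toNat = [shape.getLast hne] := by
        rw [hct, List.drop_eq_getElem_cons (by omega), hlen1, List.drop_length,
          List.getLast_eq_getElem]
      rw [hdrop, hRone, PySem.List.pyGetD_neg_one shape 0 hne]
      simp
    | succ k ih =>
      intro curRow h0 h1 hk
      have hlt : curRow < (shape.length : Int) - 1 := by omega
      rw [PySem.List.pyRange_one_cons hlt, List.map_cons, List.cons_append,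
        ih (curRow + 1) (by omega) (by omega) (by omega)]
      have h2 : (curRow + 1).toNat = curRow.toNat + 1 := by omega
      have hdrop2 : shape.drop (curRow.toNat + 1)
          = shape[curRow.toNat + 1]'(by omega) :: shape.drop (curRow.toNat + 2) := by
        rw [List.drop_eq_getElem_cons (by omega)]
      have hdrop : shape.drop curRow.toNat
          = shape[curRow.toNat]'(by omega) :: shape[curRow.toNat + 1]'(by omega)
              :: shape.drop (curRow.toNat + 2) := by
        rw [List.drop_eq_getElem_cons (by omega), ← hdrop2]
      rw [h2, hdrop2, hdrop, hRtwo]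
      congr 2
      · rw [PySem.List.pyGetD_eq_getElem shape 0 h0 (by omega)]
      · rw [PySem.List.pyGetD_eq_getElem shape 0 (by omega) (by omega)]
        simp [h2]
  exact main (shape.length - 1 - curRow.toNat) curRow h0 (by omega) rfl

theorem pvTrim_prod (l : List Int) (hl : l ≠ []) : ∀ pre : List Int,
    (pvProd (pvRangesOf l)).map (fun c =>
      let row := pre ++ c
      if PySem.List.pyGetD row (-1) 0 = 0 then PySem.List.slice row none (some (-1)) else row)
    = (pvR l).map (fun d => pre ++ d) := by
  induction l with
  | nil => exact absurd rfl hl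
  | cons x t ih =>
    cases t with
    | nil =>
      intro pre
      have h1 : pvProd [PySem.List.pyRange x (-1) (-1)]
          = (PySem.List.pyRange x (-1) (-1)).map (fun v => [v]) := by
        simp [pvProd, pvStep]
      simp only [pvRangesOf, pvR, h1, List.map_map, Function.comp_def]
      apply List.map_congr_left
      intro v _
      simp only [PySem.List.pyGetD_neg_one_append_singleton, PySem.List.slice_to_neg_one,
        List.dropLast_concat]
      split_ifs <;> simp
    | cons y u =>
      intro pre
      have hr : pvRangesOf (x :: y :: u)
          = PySem.List.pyRange x (y - 1) (-1) :: pvRangesOf (y :: u) := rfl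
      rw [hr, pvProd_cons, List.map_flatMap]
      have hR : pvR (x :: y :: u)
          = (PySem.List.pyRange x (y - 1) (-1)).flatMap
              (fun v => (pvR (y :: u)).map (fun d => v :: d)) := rfl
      rw [hR, List.map_flatMap]
      apply List.flatMap_congr
      intro v _
      have h2 : ((pvProd (pvRangesOf (y :: u))).map (fun d => v :: d)).map (fun c =>
            let row := pre ++ c
            if PySem.List.pyGetD row (-1) 0 = 0 then PySem.List.slice row none (some (-1)) else row)
          = (pvProd (pvRangesOf (y :: u))).map (fun c =>
            let row := (pre ++ [v]) ++ c
            if PySem.List.pyGetD row (-1) 0 = 0 then PySem.List.slice row none (some (-1)) else row) := by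
        rw [List.map_map]
        apply List.map_congr_left
        intro d _
        simp only [Function.comp_apply]
        exact congrArg (fun row => if PySem.List.pyGetD row (-1) 0 = 0
          then PySem.List.slice row none (some (-1)) else row) (by simp)
      rw [h2, ih (by simp) (pre ++ [v]), List.map_map]
      apply List.map_congr_left
      intro d _
      simp

theorem guardAux : ∀ (l : List Int), pvDescPos l = true → l ≠ [] →
    (l.zip l.tail).any (fun p => decide (p.1 < p.2)) = false ∧ 1 ≤ PySem.List.pyGetD l (-1) 0 := by
  intro l
  induction l with
  | nil => intro _ h; exact absurd rfl h
  | cons x t ih =>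
    intro h _
    cases t with
    | nil =>
      refine ⟨rfl, ?_⟩
      rw [PySem.List.pyGetD_neg_one _ 0 (by simp)]
      simpa [pvDescPos] using h
    | cons y u =>
      simp only [pvDescPos, Bool.and_eq_true, decide_eq_true_eq] at h
      obtain ⟨hz, hl⟩ := ih h.2 (by simp)
      constructor
      · simp only [List.tail_cons, List.zip_cons_cons, List.any_cons, Bool.or_eq_false_iff,
          decide_eq_false_iff_not, not_lt]
        exact ⟨h.1, by simpa using hz⟩
      · rw [PySem.List.pyGetD_neg_one _ 0 (by simp), List.getLast_cons (by simp : y :: u ≠ [])]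
        rwa [PySem.List.pyGetD_neg_one _ 0 (by simp)] at hl

theorem alt_eq_R (shape : List Int) (curRow : Int)
    (h0 : 0 ≤ curRow) (h1 : curRow < (shape.length : Int))
    (hdesc : pvDescPos (shape.drop curRow.toNat) = true) :
    subPartition_alt shape curRow
      = (pvR (shape.drop curRow.toNat)).map (fun d => shape.take curRow.toNat ++ d) := by
  have hne : shape.drop curRow.toNat ≠ [] := by
    apply List.ne_nil_of_length_pos
    rw [List.length_drop]
    omega
  obtain ⟨hz, hlast⟩ := guardAux _ hdesc hne
  simp only [subPartition_alt]
  rw [if_neg (not_not_intro ⟨h0, h1⟩), PySem.List.slice_from shape h0,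
    PySem.List.slice_from_one]
  have hcond : (((shape.drop curRow.toNat).zip (shape.drop curRow.toNat).tail).any
        (fun p => decide (p.1 < p.2))
      || decide (PySem.List.pyGetD (shape.drop curRow.toNat) (-1) 0 < 1)) = false := by
    rw [hz]
    simp
    omega
  rw [hcond, if_neg (by simp : ¬ (false = true))]
  have hsp := pvRangesOf_spec (shape.drop curRow.toNat) 0 le_rfl (by simpa using hne)
  simp only [Int.toNat_zero, List.drop_zero] at hsp
  rw [hsp]
  show (pvProd (pvRangesOf (shape.drop curRow.toNat))).map _ = _
  rw [PySem.List.slice_to shape h0]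
  exact pvTrim_prod _ hne _

theorem pvDescPos_pos : ∀ (l : List Int) (x : Int), pvDescPos (x :: l) = true → 1 ≤ x := by
  intro l
  induction l with
  | nil => intro x h; simpa [pvDescPos] using h
  | cons y t ih =>
    intro x h
    simp only [pvDescPos, Bool.and_eq_true, decide_eq_true_eq] at h
    exact le_trans (ih y h.2) h.1

theorem A_eq_R : ∀ (f : Nat) (shape : List Int) (curRow : Int),
    Pre_subPartition shape curRow →
    (shape.map Int.toNat).sum + (shape.length - curRow.toNat) < f →
    subPartitionFuel f shape curRow
      = (pvR (shape.drop curRow.toNat)).map (fun d => shape.take curRow.toNat ++ d) := by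
  intro f
  induction f with
  | zero => intro shape curRow _ hf; omega
  | succ f ih =>
    intro shape curRow hpre hf
    obtain ⟨h0, h1, hdesc⟩ := hpre
    have hct : curRow.toNat < shape.length := by omega
    have hne : shape ≠ [] := List.ne_nil_of_length_pos (by omega)
    by_cases hlast : curRow = (shape.length : Int) - 1
    · -- last row
      have hctl : curRow.toNat = shape.length - 1 := by omega
      have hlen1 : shape.length - 1 + 1 = shape.length := by omega
      have hdropx : shape.drop curRow.toNat = [shape.getLast hne] := by
        rw [hctl, List.drop_eq_getElem_cons (by omega), hlen1, List.drop_length,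
          List.getLast_eq_getElem]
      set x := shape.getLast hne with hxdef
      have hsplit : shape = shape.take curRow.toNat ++ [x] := by
        conv_lhs => rw [← List.take_append_drop curRow.toNat shape, hdropx]
      have hdl : shape.dropLast = shape.take curRow.toNat := by
        conv_lhs => rw [hsplit, List.dropLast_concat]
      have hx : 1 ≤ x := by
        rw [hdropx] at hdesc
        simpa [pvDescPos] using hdesc
      rw [hdropx]
      simp only [subPartitionFuel]
      rw [if_pos hlast, PySem.List.pyGet?_neg_one,
        List.getLast?_eq_getLast_of_ne_nil hne, ← hxdef]
      dsimp only
      by_cases hx1 : x - 1 = 0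
      · -- x = 1: return [mu1, mu2 with last deleted]
        have hx1' : x = 1 := by omega
        rw [hx1'] at hdropx hsplit ⊢
        simp only [if_pos (show (1 : Int) - 1 = 0 by norm_num), List.dropLast_concat]
        have hr : PySem.List.pyRange (1 : Int) (-1) (-1) = [1, 0] := by decide
        simp [pvR, hr, hdl, ← hsplit]
      · -- x ≥ 2: [mu1] ++ recurse on mu2
        simp only [if_neg hx1]
        have hmu2 : shape.dropLast ++ [x - 1] = shape.take curRow.toNat ++ [x - 1] := by
          rw [hdl]
        have hlenmu2 : (shape.take curRow.toNat ++ [x - 1]).length = shape.length := by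
          simp; omega
        have hdropmu2 : (shape.take curRow.toNat ++ [x - 1]).drop curRow.toNat = [x - 1] :=
          List.drop_left' (by simp; omega)
        have htakemu2 : (shape.take curRow.toNat ++ [x - 1]).take curRow.toNat
            = shape.take curRow.toNat :=
          List.take_left' (by simp; omega)
        have hsum : ((shape.take curRow.toNat ++ [x - 1]).map Int.toNat).sum + 1
            = (shape.map Int.toNat).sum := by
          conv_rhs => rw [hsplit]
          simp
          omega
        have hih := ih (shape.take curRow.toNat ++ [x - 1]) curRow
          ⟨h0, by rw [hlenmu2]; exact h1, by rw [hdropmu2]; simp [pvDescPos]; omega⟩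
          (by rw [hlenmu2]; omega)
        rw [hmu2, hih, hdropmu2, htakemu2]
        have hpvR : pvR [x] = (PySem.List.pyRange x (-1) (-1)).map
            (fun v => if v = 0 then [] else [v]) := rfl
        rw [hpvR, PySem.List.pyRange_neg_one_cons (by omega : (-1 : Int) < x), List.map_cons]
        have hpvR' : pvR [x - 1] = (PySem.List.pyRange (x - 1) (-1) (-1)).map
            (fun v => if v = 0 then [] else [v]) := rfl
        rw [← hpvR', List.map_cons]
        have hxne : ¬ (x = 0) := by omega
        simp only [if_neg hxne]
        rw [← hsplit]
        rfl
    · -- not last row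
      have hlt : curRow.toNat + 1 < shape.length := by omega
      set ct := curRow.toNat with hctdef
      have hgx : PySem.List.pyGet? shape curRow = some (shape[ct]'hct) :=
        PySem.List.pyGet?_eq_some_getElem shape h0 h1
      have hgy : PySem.List.pyGet? shape (curRow + 1) = some (shape[ct + 1]'hlt) := by
        rw [PySem.List.pyGet?_eq_some_getElem shape (by omega) (by omega)]
        have h21 : (curRow + 1).toNat = ct + 1 := by omega
        simp [h21]
      set x := shape[ct]'hct
      set y := shape[ct + 1]'hlt
      have hdrop2 : shape.drop (ct + 1) = y :: shape.drop (ct + 2) :=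
        List.drop_eq_getElem_cons hlt
      have hdrop : shape.drop ct = x :: y :: shape.drop (ct + 2) := by
        rw [List.drop_eq_getElem_cons hct, ← hdrop2]
      have hdesc' : y ≤ x ∧ pvDescPos (y :: shape.drop (ct + 2)) = true := by
        rw [hdrop] at hdesc
        simpa [pvDescPos] using hdesc
      have htake : shape.take (ct + 1) = shape.take ct ++ [x] := by
        rw [List.take_add_one, List.getElem?_eq_getElem hct]
        rfl
      have hctp1 : (curRow + 1).toNat = ct + 1 := by omega
      have hih1 := ih shape (curRow + 1)
        ⟨by omega, by omega, by rw [hctp1, hdrop2]; exact hdesc'.2⟩ (by omega)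
      rw [hctp1] at hih1
      simp only [subPartitionFuel]
      rw [if_neg hlast, hgx, hgy]
      by_cases hxy : x = y
      · simp only [if_pos hxy]
        rw [hih1, hdrop]
        have hr : PySem.List.pyRange x (y - 1) (-1) = [x] := by
          rw [PySem.List.pyRange_neg_one_cons (by omega),
            PySem.List.pyRange_neg_one_eq_nil (by omega)]
        have hpvR : pvR (x :: y :: shape.drop (ct + 2))
            = (PySem.List.pyRange x (y - 1) (-1)).flatMap
                (fun v => (pvR (y :: shape.drop (ct + 2))).map (fun d => v :: d)) := rfl
        rw [hpvR, hr, ← hdrop2, List.flatMap_cons, List.flatMap_nil, List.append_nil,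
          List.map_map]
        apply List.map_congr_left
        intro d _
        simp [htake]
      · simp only [if_neg hxy]
        have hyx : y < x := lt_of_le_of_ne hdesc'.1 (fun h => hxy h.symm)
        have hy1 : 1 ≤ y := pvDescPos_pos _ _ hdesc'.2
        have hmu2 : shape.set ct (x - 1) = shape.take ct ++ (x - 1) :: shape.drop (ct + 1) := by
          rw [List.set_eq_take_append_cons_drop, if_pos hct]
        have hsplit : shape = shape.take ct ++ x :: shape.drop (ct + 1) := by
          conv_lhs => rw [← List.take_append_drop ct shape, List.drop_eq_getElem_cons hct]
        have hlenmu2 : (shape.set ct (x - 1)).length = shape.length := by simp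
        have htl : (shape.take ct).length = ct := by simp; omega
        have hdropmu2 : (shape.set ct (x - 1)).drop ct = (x - 1) :: shape.drop (ct + 1) := by
          rw [hmu2]
          exact List.drop_left' htl
        have htakemu2 : (shape.set ct (x - 1)).take ct = shape.take ct := by
          rw [hmu2]
          exact List.take_left' htl
        have hsum : ((shape.set ct (x - 1)).map Int.toNat).sum + 1 = (shape.map Int.toNat).sum := by
          conv_rhs => rw [hsplit]
          rw [hmu2]
          simp
          omega
        have hih2 := ih (shape.set ct (x - 1)) curRow
          ⟨h0, by rw [hlenmu2]; exact h1,
           by rw [← hctdef, hdropmu2, hdrop2]; simp [pvDescPos]; exact ⟨by omega, hdesc'.2⟩⟩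
          (by rw [hlenmu2]; omega)
        rw [← hctdef] at hih2
        rw [hih1, hih2, hdropmu2, htakemu2, hdrop, hdrop2]
        have hpvR : pvR (x :: y :: shape.drop (ct + 2))
            = (PySem.List.pyRange x (y - 1) (-1)).flatMap
                (fun v => (pvR (y :: shape.drop (ct + 2))).map (fun d => v :: d)) := rfl
        have hpvR2 : pvR ((x - 1) :: y :: shape.drop (ct + 2))
            = (PySem.List.pyRange (x - 1) (y - 1) (-1)).flatMap
                (fun v => (pvR (y :: shape.drop (ct + 2))).map (fun d => v :: d)) := rfl
        rw [hpvR, PySem.List.pyRange_neg_one_cons (by omega), List.flatMap_cons, ← hpvR2,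
          List.map_append, List.map_map]
        congr 1
        apply List.map_congr_left
        intro d _
        simp [htake]

-- ===== VERDICT (by name: the statement is the Claim_ definition above) =====
theorem subPartition_spec : Claim_equal_subPartition := by
  intro shape curRow _ hpre
  unfold Spec_subPartition
  obtain ⟨h0, h1, h2⟩ := hpre
  rw [subPartition, A_eq_R _ _ _ ⟨h0, h1, h2⟩ (by omega), alt_eq_R _ _ h0 h1 h2]
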